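-- pv_equiv track=rewrite | github.com/jscottbruns/sandbox | python/minion.py | answer
-- ===== SOURCE A (Python) =====
-- def is_prime(n):
--     m = n/2
--     for i in range(2, int(m+1)):
--         if n % i == 0:
--             return False
--     return True
--
-- def answer(n):
--     prime_concat = ''
--     c = 2
--
--     while len(prime_concat) <= n+5:
--         if is_prime(c):
--             prime_concat += str(c)
--         c += 1
--
--     return prime_concat[n:n+5]
-- ===== SOURCE B (Python) =====
-- def answer(n):
--     parts = []
--     total = 0
--     c = 2
--     while total <= n + 5:
--         i = 2
--         prime = True
--         while i * i <= c:
--             if c % i == 0: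
--                 prime = False
--                 break
--             i += 1
--         if prime:
--             s = str(c)
--             parts.append(s)
--             total += len(s)
--         c += 1
--     return ''.join(parts)[n:n+5]
-- ===== Notes on version B (the rewrite author's own statement) =====
-- stated objective: faster
-- what changed: B tests each candidate by trial division only up to sqrt(c) (inner while i*i<=c loop) instead of A's division by every i up to c/2, and collects the prime strings in a list joined once at the end instead of repeated string concatenation.
import Mathlib
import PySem

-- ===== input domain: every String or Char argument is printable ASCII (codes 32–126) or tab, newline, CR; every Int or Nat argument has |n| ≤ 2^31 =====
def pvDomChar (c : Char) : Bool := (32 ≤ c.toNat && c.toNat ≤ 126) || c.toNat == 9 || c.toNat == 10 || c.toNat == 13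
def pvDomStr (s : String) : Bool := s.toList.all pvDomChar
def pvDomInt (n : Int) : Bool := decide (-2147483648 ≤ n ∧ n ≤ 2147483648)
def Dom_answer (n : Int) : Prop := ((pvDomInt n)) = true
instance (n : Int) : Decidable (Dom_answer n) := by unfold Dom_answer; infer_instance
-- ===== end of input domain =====

-- B replaces A's per-candidate trial division by every i up to c/2 with trial division only up to √c,
-- collecting the prime strings in a list joined once at the end: objective 'faster'.
-- Both while-loops are ported with a fuel guard (2^(n+8) iterations, far more than the loop can use,
-- since the first 2^(n+8) candidates contain well over n+6 primes); fuel only makes the loop total.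

-- ===== PORT A =====
-- is_prime: for every argument c ≥ 2 the loop reaches, int(c/2 + 1) = c // 2 + 1 (float division
-- by 2 is exact there), ported as floordiv; the for/early-return is the short-circuiting List.all.
def isPrimeA (nn : Int) : Bool :=
  (PySem.List.pyRange 2 (PySem.Int.floordiv nn 2 + 1) 1).all (fun i => !(PySem.Int.mod nn i == 0))

def answerLoop : Int → Nat → String → Int → String
  | _, 0, s, _ => s
  | n, fuel + 1, s, c =>
      if PySem.Str.len s ≤ n + 5 then
        answerLoop n fuel (if isPrimeA c then s ++ PySem.Int.toStr c else s) (c + 1)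
      else s

def answer (n : Int) : String :=
  PySem.Str.slice (answerLoop n (2 ^ (n + 8).toNat) "" 2) (some n) (some (n + 5))

-- ===== PORT B =====
-- inner 'while i*i <= c' trial-division loop of Source B (break = returning false)
def isPrimeB (c : Int) (i : Int) : Bool :=
  if i * i ≤ c then
    if PySem.Int.mod c i == 0 then false else isPrimeB c (i + 1)
  else true
termination_by (c + 1 - i).toNat
decreasing_by
  rename_i hguard
  have hi : i ≤ c := by
    rcases le_or_gt i 0 with h | h
    · nlinarith [hguard]
    · nlinarith [hguard]
  omega

def answerAltLoop : Int → Nat → List String → Int → Int → List String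
  | _, 0, parts, _, _ => parts
  | n, fuel + 1, parts, total, c =>
      if total ≤ n + 5 then
        if isPrimeB c 2 then
          answerAltLoop n fuel (parts ++ [PySem.Int.toStr c])
            (total + PySem.Str.len (PySem.Int.toStr c)) (c + 1)
        else
          answerAltLoop n fuel parts total (c + 1)
      else parts

def answer_alt (n : Int) : String :=
  PySem.Str.slice (PySem.Str.join "" (answerAltLoop n (2 ^ (n + 8).toNat) [] 0 2))
    (some n) (some (n + 5))

-- ===== PRECONDITION & SPEC =====
def Spec_answer (n : Int) (out : String) : Prop := out = answer_alt n
instance (n : Int) (out : String) : Decidable (Spec_answer n out) := by unfold Spec_answer; infer_instance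

-- ===== CLAIM (what is proved, stated in full; the proofs are below) =====
def Claim_equal_answer : Prop := ∀ (n : Int), Dom_answer n → Spec_answer n (answer n)

-- ===== LEMMAS AND PROOFS =====

theorem pvMod_eq_zero_iff (a b : Int) (hb : 0 < b) : PySem.Int.mod a b = 0 ↔ b ∣ a := by
  unfold PySem.Int.mod
  rw [Int.fmod_eq_emod, if_pos (Or.inl (le_of_lt hb)), add_zero]
  exact ⟨Int.dvd_of_emod_eq_zero, Int.emod_eq_zero_of_dvd⟩

theorem pvFdiv_two (c : Int) : PySem.Int.floordiv c 2 = c / 2 := by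
  unfold PySem.Int.floordiv
  rw [Int.fdiv_eq_ediv, if_pos (Or.inl (by norm_num)), sub_zero]

theorem pvIsPrimeA_iff (nn : Int) : isPrimeA nn = true ↔
    ∀ i : Int, 2 ≤ i → i ≤ PySem.Int.floordiv nn 2 → PySem.Int.mod nn i ≠ 0 := by
  unfold isPrimeA
  simp only [List.all_eq_true, PySem.List.mem_pyRange_one]
  constructor
  · intro h i h1 h2
    have := h i ⟨h1, by omega⟩
    simpa using this
  · intro h i ⟨h1, h2⟩
    simpa using h i h1 (by omega)

theorem pvIsPrimeA_of_prime (c : Int) (hc : 2 ≤ c) (hp : (c.toNat).Prime) : isPrimeA c = true := by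
  rw [pvIsPrimeA_iff]
  intro i h1 h2 hmod
  have hdvd : i ∣ c := (pvMod_eq_zero_iff c i (by omega)).mp hmod
  rw [pvFdiv_two] at h2
  have hdvdN : i.toNat ∣ c.toNat := by
    have : ((i.toNat : Int)) ∣ ((c.toNat : Int)) := by
      have hi : (i.toNat : Int) = i := by omega
      have hc' : (c.toNat : Int) = c := by omega
      rw [hi, hc']; exact hdvd
    exact_mod_cast this
  rcases (Nat.Prime.eq_one_or_self_of_dvd hp _ hdvdN) with h | h
  · omega
  · omega

theorem pvIsPrimeA_of_not_prime (c : Int) (hc : 2 ≤ c) (hp : ¬ (c.toNat).Prime) : isPrimeA c = false := by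
  have hm := Nat.minFac_prime (n := c.toNat) (by omega)
  have hdvd := Nat.minFac_dvd c.toNat
  have hsq : (c.toNat).minFac ^ 2 ≤ c.toNat := Nat.minFac_sq_le_self (by omega) hp
  set m := (c.toNat).minFac with hmdef
  have h2m : 2 ≤ m := hm.two_le
  have hhalf : m ≤ c.toNat / 2 := by
    rw [Nat.le_div_iff_mul_le (by omega)]
    nlinarith [hsq]
  cases h : isPrimeA c with
  | false => rfl
  | true =>
    exfalso
    have := (pvIsPrimeA_iff c).mp h (m : Int) (by exact_mod_cast h2m)
      (by rw [pvFdiv_two]; omega)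
    apply this
    rw [pvMod_eq_zero_iff c (m : Int) (by exact_mod_cast Nat.lt_of_lt_of_le (by norm_num) h2m)]
    have : ((m : Int)) ∣ ((c.toNat : Int)) := by exact_mod_cast hdvd
    have hc' : ((c.toNat : Int)) = c := by omega
    rwa [hc'] at this

theorem pvIsPrimeB_iff (c : Int) : ∀ (i : Int), 2 ≤ i →
    (isPrimeB c i = true ↔ ∀ j : Int, i ≤ j → j * j ≤ c → PySem.Int.mod c j ≠ 0) := by
  refine isPrimeB.induct c
    (fun i => 2 ≤ i → (isPrimeB c i = true ↔ ∀ j : Int, i ≤ j → j * j ≤ c → PySem.Int.mod c j ≠ 0))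
    ?_ ?_ ?_
  · intro i hle heq _
    rw [isPrimeB, if_pos hle, if_pos heq]
    constructor
    · intro h; exact absurd h (by simp)
    · intro h; exact absurd (by simpa using heq) (h i le_rfl hle)
  · intro i hle hne ih h2
    rw [isPrimeB, if_pos hle, if_neg hne]
    rw [ih (by omega)]
    constructor
    · intro h j hij hjj
      rcases eq_or_lt_of_le hij with rfl | hlt
      · simpa using hne
      · exact h j (by omega) hjj
    · intro h j hij hjj
      exact h j (by omega) hjj
  · intro i hle h2
    rw [isPrimeB, if_neg hle]
    constructor
    · intro _ j hij hjj
      exfalso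
      have : i * i ≤ j * j := by nlinarith
      omega
    · intro _; rfl

theorem pvIsPrimeB_of_prime (c : Int) (hc : 2 ≤ c) (hp : (c.toNat).Prime) : isPrimeB c 2 = true := by
  rw [pvIsPrimeB_iff c 2 le_rfl]
  intro j h2 hjj hmod
  have hdvd : j ∣ c := (pvMod_eq_zero_iff c j (by omega)).mp hmod
  have hdvdN : j.toNat ∣ c.toNat := by
    have : ((j.toNat : Int)) ∣ ((c.toNat : Int)) := by
      have hj : (j.toNat : Int) = j := by omega
      have hc' : (c.toNat : Int) = c := by omega
      rw [hj, hc']; exact hdvd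
    exact_mod_cast this
  rcases (Nat.Prime.eq_one_or_self_of_dvd hp _ hdvdN) with h | h
  · omega
  · have hjc : j = c := by omega
    subst hjc
    nlinarith

theorem pvIsPrimeB_of_not_prime (c : Int) (hc : 2 ≤ c) (hp : ¬ (c.toNat).Prime) : isPrimeB c 2 = false := by
  have hm := Nat.minFac_prime (n := c.toNat) (by omega)
  have hdvd := Nat.minFac_dvd c.toNat
  have hsq : (c.toNat).minFac ^ 2 ≤ c.toNat := Nat.minFac_sq_le_self (by omega) hp
  set m := (c.toNat).minFac with hmdef
  have h2m : 2 ≤ m := hm.two_le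
  cases h : isPrimeB c 2 with
  | false => rfl
  | true =>
    exfalso
    have hmm : ((m : Int)) * ((m : Int)) ≤ c := by
      have : (m : Int) * (m : Int) = ((m ^ 2 : Nat) : Int) := by push_cast; ring
      rw [this]
      have hc' : ((c.toNat : Int)) = c := by omega
      calc ((m ^ 2 : Nat) : Int) ≤ ((c.toNat : Int)) := by exact_mod_cast hsq
        _ = c := hc'
    have := (pvIsPrimeB_iff c 2 le_rfl).mp h (m : Int) (by exact_mod_cast h2m) hmm
    apply this
    rw [pvMod_eq_zero_iff c (m : Int) (by exact_mod_cast Nat.lt_of_lt_of_le (by norm_num) h2m)]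
    have : ((m : Int)) ∣ ((c.toNat : Int)) := by exact_mod_cast hdvd
    have hc' : ((c.toNat : Int)) = c := by omega
    rwa [hc'] at this

theorem pvTest_eq (c : Int) (hc : 2 ≤ c) : isPrimeA c = isPrimeB c 2 := by
  by_cases hp : (c.toNat).Prime
  · rw [pvIsPrimeA_of_prime c hc hp, pvIsPrimeB_of_prime c hc hp]
  · rw [pvIsPrimeA_of_not_prime c hc hp, pvIsPrimeB_of_not_prime c hc hp]

theorem pvJoin_nil_flatten : ∀ (l : List (List Char)), PySem.Chars.join [] l = l.flatten := by
  intro l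
  induction l with
  | nil => rw [PySem.Chars.join_nil]; rfl
  | cons x xs ih =>
    cases xs with
    | nil => rw [PySem.Chars.join_singleton]; simp
    | cons y ys =>
      rw [PySem.Chars.join_cons_cons]
      simp [ih]

theorem pvJoin_append (parts : List String) (t : String) :
    PySem.Str.join "" (parts ++ [t]) = PySem.Str.join "" parts ++ t := by
  rw [← String.toList_inj]
  rw [String.toList_append, PySem.Str.toList_join, PySem.Str.toList_join]
  simp [pvJoin_nil_flatten]

theorem pvLen_append (s t : String) :
    PySem.Str.len (s ++ t) = PySem.Str.len s + PySem.Str.len t := by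
  simp [PySem.Str.len_eq, String.toList_append]

theorem pvEmpty_join : "" = PySem.Str.join "" ([] : List String) := by
  rw [← String.toList_inj, PySem.Str.toList_join]
  simp

theorem pvLen_empty : (0 : Int) = PySem.Str.len "" := by
  rw [PySem.Str.len_eq]
  rfl

theorem pvLoop_eq (n : Int) : ∀ (fuel : Nat) (s : String) (c : Int)
    (parts : List String) (total : Int), 2 ≤ c →
    s = PySem.Str.join "" parts → total = PySem.Str.len s →
    answerLoop n fuel s c = PySem.Str.join "" (answerAltLoop n fuel parts total c) := by
  intro fuel
  induction fuel with
  | zero =>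
    intro s c parts total _ hs _
    rw [answerLoop, answerAltLoop]
    exact hs
  | succ f ih =>
    intro s c parts total hc hs ht
    rw [answerLoop, answerAltLoop]
    by_cases hguard : PySem.Str.len s ≤ n + 5
    · rw [if_pos hguard, if_pos (show total ≤ n + 5 by rw [ht]; exact hguard)]
      by_cases hA : isPrimeA c = true
      · have hB : isPrimeB c 2 = true := by rw [← pvTest_eq c hc]; exact hA
        rw [if_pos hA, if_pos hB]
        exact ih (s ++ PySem.Int.toStr c) (c + 1) (parts ++ [PySem.Int.toStr c])
          (total + PySem.Str.len (PySem.Int.toStr c)) (by omega)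
          (by rw [hs, pvJoin_append]) (by rw [pvLen_append, ht])
      · have hB : ¬ isPrimeB c 2 = true := by rw [← pvTest_eq c hc]; exact hA
        rw [if_neg hA, if_neg hB]
        exact ih s (c + 1) parts total (by omega) hs ht
    · rw [if_neg hguard, if_neg (show ¬ total ≤ n + 5 by rw [ht]; exact hguard)]
      exact hs

-- ===== VERDICT (by name: the statement is the Claim_ definition above) =====
theorem answer_spec : Claim_equal_answer := by
  unfold Claim_equal_answer
  intro n _
  unfold Spec_answer answer answer_alt
  rw [pvLoop_eq n (2 ^ (n + 8).toNat) "" 2 [] 0 (by norm_num) pvEmpty_join pvLen_empty]
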